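-- pv_equiv track=rewrite | github.com/sefaksc/Workflow-Agent | engine/workflow.py | _split_identifier
-- ===== SOURCE A (Python) =====
-- def _split_identifier(value: str) -> list[str]:
--     chunks: list[str] = []
--     current = ""
--     for char in value:
--         if char.isalnum():
--             current += char
--             continue
--         if current:
--             chunks.append(current)
--             current = ""
--     if current:
--         chunks.append(current)
--     return chunks
-- ===== SOURCE B (Python) =====
-- def _split_identifier(value: str) -> list[str]:
--     # Span scan: find each maximal alphanumeric run and slice it out directly,
--     # instead of accumulating characters one by one with flush logic.
--     chunks: list[str] = []
--     i, n = 0, len(value)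
--     while i < n:
--         if value[i].isalnum():
--             j = i
--             while j < n and value[j].isalnum():
--                 j += 1
--             chunks.append(value[i:j])
--             i = j
--         else:
--             i += 1
--     return chunks
-- ===== Notes on version B (the rewrite author's own statement) =====
-- stated objective: alternative
-- what changed: Replaces the per-character accumulator with flush-on-boundary/flush-at-end logic by a span scan that locates each maximal alphanumeric run and appends it as one slice.
import Mathlib
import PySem

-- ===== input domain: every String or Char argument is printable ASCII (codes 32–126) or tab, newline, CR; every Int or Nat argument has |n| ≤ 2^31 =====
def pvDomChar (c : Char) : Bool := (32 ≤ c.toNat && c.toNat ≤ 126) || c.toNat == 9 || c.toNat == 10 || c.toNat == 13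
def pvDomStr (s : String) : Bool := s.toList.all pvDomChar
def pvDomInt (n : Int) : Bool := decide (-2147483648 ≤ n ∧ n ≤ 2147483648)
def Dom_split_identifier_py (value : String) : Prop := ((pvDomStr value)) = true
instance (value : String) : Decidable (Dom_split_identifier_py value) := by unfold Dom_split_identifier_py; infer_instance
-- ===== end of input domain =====

-- B replaces A's per-character accumulator with flush logic by a span scan over maximal
-- alphanumeric runs (alternative decomposition, same cost).


-- ===== PORT A =====
-- state: (chunks, current); flush current on a non-alnum char, then once more at the end
def pvAStep (st : List String × List Char) (c : Char) : List String × List Char :=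
  if PySem.Chars.isalnum c then (st.1, st.2 ++ [c])
  else if st.2 ≠ [] then (st.1 ++ [String.ofList st.2], []) else st

def split_identifier_py (value : String) : List String :=
  let st := value.toList.foldl pvAStep ([], [])
  if st.2 ≠ [] then st.1 ++ [String.ofList st.2] else st.1

-- ===== PORT B =====
-- span scan: take each maximal alphanumeric run whole (inner while = takeWhile, i = j skip = dropWhile)
def pvSpan : List Char → List String
  | [] => []
  | c :: cs =>
    if PySem.Chars.isalnum c then
      String.ofList (c :: cs.takeWhile PySem.Chars.isalnum) :: pvSpan (cs.dropWhile PySem.Chars.isalnum)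
    else pvSpan cs
termination_by l => l.length
decreasing_by
  · simpa using Nat.lt_succ_of_le (List.length_dropWhile_le _ _)
  · simp

def split_identifier_py_alt (value : String) : List String := pvSpan value.toList

-- ===== PRECONDITION & SPEC =====
def Spec_split_identifier_py (value : String) (out : List String) : Prop := out = split_identifier_py_alt value
instance (value : String) (out : List String) : Decidable (Spec_split_identifier_py value out) := by unfold Spec_split_identifier_py; infer_instance

-- ===== CLAIM (what is proved, stated in full; the proofs are below) =====
def Claim_equal_split_identifier_py : Prop := ∀ (value : String), Dom_split_identifier_py value → Spec_split_identifier_py value (split_identifier_py value)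

-- ===== LEMMAS AND PROOFS =====
-- the invariant: running A's loop from (chunks, cur) and flushing equals chunks ++ the runs of l,
-- where a nonempty pending cur is merged into the first run
def pvFinish (st : List String × List Char) : List String :=
  if st.2 ≠ [] then st.1 ++ [String.ofList st.2] else st.1

theorem pvA_invariant (l : List Char) (chunks : List String) (cur : List Char) :
    pvFinish (l.foldl pvAStep (chunks, cur)) =
    chunks ++ (if cur = [] then pvSpan l
               else String.ofList (cur ++ l.takeWhile PySem.Chars.isalnum) ::
                    pvSpan (l.dropWhile PySem.Chars.isalnum)) := by
  induction l generalizing chunks cur with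
  | nil => by_cases h : cur = [] <;> simp [h, pvSpan, pvFinish]
  | cons c cs ih =>
    by_cases ha : PySem.Chars.isalnum c
    · by_cases h : cur = []
      · simp only [List.foldl_cons, pvAStep, ha, if_pos, h, List.nil_append]
        rw [ih]
        simp [pvSpan, ha]
      · simp only [List.foldl_cons, pvAStep, ha, if_pos]
        rw [ih]
        simp [h, ha]
    · by_cases h : cur = []
      · simp only [List.foldl_cons, pvAStep, ha]
        rw [if_neg (by simp [ha]), if_neg (by simp [h]), ih]
        simp [pvSpan, ha, h]
      · simp only [List.foldl_cons, pvAStep]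
        rw [if_neg (by simp [ha]), if_pos h]
        rw [ih]
        simp [pvSpan, ha, h]

-- ===== VERDICT (by name: the statement is the Claim_ definition above) =====
theorem split_identifier_py_spec : Claim_equal_split_identifier_py := by
  intro value _
  unfold Spec_split_identifier_py split_identifier_py split_identifier_py_alt
  have := pvA_invariant value.toList [] []
  simpa [pvFinish] using this
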